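-- pv_equiv track=rewrite | github.com/monoprimula/Pixly | goruntu_isleme/morfolojik_islemler.py | cv2_benzeri_esikleme
-- ===== SOURCE A (Python) =====
-- def cv2_benzeri_esikleme(goruntu, esik_degerleri=[64, 128, 192]):
--     if not esik_degerleri:
--         raise ValueError("Eşik değerleri listesi boş olamaz!")
--
--     # Grup sayısı = len(esik_degerleri) + 1
--     binary = [[0 for _ in range(len(goruntu[0]))] for _ in range(len(goruntu))]
--
--     for i in range(len(goruntu)):
--         for j in range(len(goruntu[0])):
--             piksel = goruntu[i][j]
--             if isinstance(piksel, list):  # RGB ise ortalama al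
--                 piksel = sum(piksel) // len(piksel)
--
--             # Pikseli uygun gruba ata
--             for k, esik in enumerate(esik_degerleri):
--                 if piksel <= esik:
--                     binary[i][j] = k * (255 // len(esik_degerleri))  # Grup değeri
--                     break
--             else:
--                 binary[i][j] = 255  # Son grup (en yüksek değerler)
--
--     return esik_degerleri, binary
-- ===== SOURCE B (Python) =====
-- def cv2_benzeri_esikleme(goruntu, esik_degerleri=[64, 128, 192]):
--     if not esik_degerleri:
--         raise ValueError("Eşik değerleri listesi boş olamaz!")
--
--     adim = 255 // len(esik_degerleri)
--     w = len(goruntu[0]) if goruntu else 0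
--
--     # gray matrix (one pass), truncated to the width of row 0 like A's range(len(goruntu[0]))
--     gri = [[sum(p) // len(p) if isinstance(p, list) else p for p in (row[j] for j in range(w))]
--            for row in goruntu]
--
--     # threshold-major: start everything in the last band (255) and sweep the thresholds
--     # from last to first, overwriting every pixel <= that threshold with its band value;
--     # the first (smallest-index) matching threshold is applied last, so it wins.
--     binary = [[255] * w for _ in goruntu]
--     for k, esik in reversed(list(enumerate(esik_degerleri))):
--         binary = [[k * adim if g <= esik else b for g, b in zip(grow, brow)]
--                   for grow, brow in zip(gri, binary)]
--     return esik_degerleri, binary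
-- ===== Notes on version B (the rewrite author's own statement) =====
-- stated objective: alternative
-- what changed: Replaces A's pixel-major first-match threshold scan (per-pixel enumerate/break/else-255) by a threshold-major algorithm: a gray matrix is built in one pass, the output starts as an all-255 matrix, and the thresholds are swept from last to first, each pass overwriting every pixel <= that threshold with its band value, so the first matching threshold wins by being applied last.
import Mathlib
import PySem

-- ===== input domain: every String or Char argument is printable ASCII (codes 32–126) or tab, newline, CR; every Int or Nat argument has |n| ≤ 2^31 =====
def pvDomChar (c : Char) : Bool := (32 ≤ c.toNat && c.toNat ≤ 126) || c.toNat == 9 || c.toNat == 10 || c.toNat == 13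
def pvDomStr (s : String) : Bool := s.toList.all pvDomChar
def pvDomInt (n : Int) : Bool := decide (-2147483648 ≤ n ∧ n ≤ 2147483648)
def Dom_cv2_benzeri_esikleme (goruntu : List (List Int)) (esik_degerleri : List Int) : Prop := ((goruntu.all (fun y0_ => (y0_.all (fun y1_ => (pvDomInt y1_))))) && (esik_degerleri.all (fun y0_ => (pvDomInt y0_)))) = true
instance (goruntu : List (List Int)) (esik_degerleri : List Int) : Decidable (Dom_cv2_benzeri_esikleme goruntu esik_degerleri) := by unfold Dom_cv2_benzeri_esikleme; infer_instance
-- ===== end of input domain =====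

-- B replaces A's pixel-major first-match threshold scan by a threshold-major algorithm:
-- an all-255 matrix is overwritten by one masking pass per threshold, swept from last to
-- first so the first matching threshold wins by being applied last; equivalence is about
-- the return value. (Pixels are Int here, so A's isinstance-list averaging branch is vacuous.)

-- ===== PORT A =====
-- A's inner `for k, esik in enumerate(...): if piksel <= esik: ...break / else: 255`
def pvScanA (adim : Int) (piksel : Int) : List (Int × Int) → Int
  | [] => 255
  | (k, esik) :: rest => if piksel ≤ esik then k * adim else pvScanA adim piksel rest

def cv2_benzeri_esikleme (goruntu : List (List Int)) (esik_degerleri : List Int) : List Int × List (List Int) :=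
  -- `len(goruntu[0])`: lazy in Python, never evaluated when goruntu = []; under Pre_ every
  -- row has at least this length, so pyGetD's default is never used inside Pre_.
  let w := (goruntu.headD []).length
  let binary0 : List (List Int) :=
    (List.range goruntu.length).map (fun _ => (List.range w).map (fun _ => (0 : Int)))
  let binary :=
    (PySem.List.pyRange 0 (goruntu.length : Int)).foldl (fun b i =>
      (PySem.List.pyRange 0 (w : Int)).foldl (fun b j =>
        let piksel := PySem.List.pyGetD (PySem.List.pyGetD goruntu i []) j 0
        let val := pvScanA (PySem.Int.floordiv 255 (esik_degerleri.length : Int)) piksel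
                     (PySem.List.enumerate esik_degerleri)
        b.set i.toNat ((b.getD i.toNat []).set j.toNat val)) b) binary0
  (esik_degerleri, binary)

-- ===== PORT B =====
def cv2_benzeri_esikleme_alt (goruntu : List (List Int)) (esik_degerleri : List Int) : List Int × List (List Int) :=
  let adim := PySem.Int.floordiv 255 (esik_degerleri.length : Int)
  -- `len(goruntu[0]) if goruntu else 0`
  let w := (goruntu.headD []).length
  -- gray matrix: pixels are Int, so the isinstance branch is the identity
  let gri := goruntu.map (fun row => (PySem.List.pyRange 0 (w : Int)).map
    (fun j => PySem.List.pyGetD row j 0))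
  -- binary = [[255]*w for _ in goruntu]
  let binary0 := goruntu.map (fun _ => List.replicate w (255 : Int))
  -- for k, esik in reversed(list(enumerate(esik_degerleri))): masking pass
  let binary := ((PySem.List.enumerate esik_degerleri).reverse).foldl
    (fun b kt => (gri.zip b).map (fun gb =>
      (gb.1.zip gb.2).map (fun p => if p.1 ≤ kt.2 then kt.1 * adim else p.2))) binary0
  (esik_degerleri, binary)

-- ===== PRECONDITION & SPEC =====
-- Pre_ excludes exactly the inputs on which Python A raises: an empty threshold list
-- (ValueError) and an image with some row shorter than row 0 (IndexError on goruntu[i][j]);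
-- B raises on those same inputs. The empty image, on which A returns, is inside Pre_.
def Pre_cv2_benzeri_esikleme (goruntu : List (List Int)) (esik_degerleri : List Int) : Prop :=
  esik_degerleri ≠ [] ∧ ∀ satir ∈ goruntu, (goruntu.headD []).length ≤ satir.length
instance (goruntu : List (List Int)) (esik_degerleri : List Int) : Decidable (Pre_cv2_benzeri_esikleme goruntu esik_degerleri) := by unfold Pre_cv2_benzeri_esikleme; infer_instance
def pvWitness_cv2_benzeri_esikleme : List (List Int) × List Int := ([[10, 100], [200, 30]], [64, 128])

def Spec_cv2_benzeri_esikleme (goruntu : List (List Int)) (esik_degerleri : List Int) (out : List Int × List (List Int)) : Prop := out = cv2_benzeri_esikleme_alt goruntu esik_degerleri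
instance (goruntu : List (List Int)) (esik_degerleri : List Int) (out : List Int × List (List Int)) : Decidable (Spec_cv2_benzeri_esikleme goruntu esik_degerleri out) := by unfold Spec_cv2_benzeri_esikleme; infer_instance

-- ===== CLAIM (what is proved, stated in full; the proofs are below) =====
def Claim_equal_cv2_benzeri_esikleme : Prop := ∀ (goruntu : List (List Int)) (esik_degerleri : List Int), Dom_cv2_benzeri_esikleme goruntu esik_degerleri → Pre_cv2_benzeri_esikleme goruntu esik_degerleri → Spec_cv2_benzeri_esikleme goruntu esik_degerleri (cv2_benzeri_esikleme goruntu esik_degerleri)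

-- ===== LEMMAS AND PROOFS =====

-- the common value specification: the band of one pixel, and one output row
def pvScanB (adim : Int) (deger : Int) : List (Int × Int) → Int
  | [] => 255
  | (k, esik) :: rest => if deger ≤ esik then k * adim else pvScanB adim deger rest

def pvBand (esik_degerleri : List Int) (v : Int) : Int :=
  pvScanB (PySem.Int.floordiv 255 (esik_degerleri.length : Int)) v (PySem.List.enumerate esik_degerleri)

def pvRowSpec (esik_degerleri : List Int) (w : Nat) (satir : List Int) : List Int :=
  (PySem.List.pyRange 0 (w : Int)).map (fun j => pvBand esik_degerleri (PySem.List.pyGetD satir j 0))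

theorem pvScanA_eq_scanB (adim v : Int) (l : List (Int × Int)) :
    pvScanA adim v l = pvScanB adim v l := by
  induction l with
  | nil => rfl
  | cons p rest ih => cases p; simp [pvScanA, pvScanB, ih]

-- ---- A side ----

theorem pvRowFold (f : Nat → Int) :
    ∀ (n : Nat) (row : List Int), n ≤ row.length →
    (List.range n).foldl (fun r j => r.set j (f j)) row
      = (List.range n).map f ++ row.drop n := by
  intro n
  induction n with
  | zero => simp
  | succ n ih =>
      intro row hn
      rw [List.range_succ, List.foldl_append, ih row (by omega)]
      simp only [List.foldl_cons, List.foldl_nil, List.set_append, List.length_map,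
        List.length_range, lt_irrefl, if_false, Nat.sub_self]
      have hd : row.drop n = row[n] :: row.drop (n + 1) :=
        List.drop_eq_getElem_cons (by omega)
      rw [hd, List.set_cons_zero]
      simp

theorem pvMatFold (f : Nat → Int) (i : Nat) :
    ∀ (n : Nat) (b : List (List Int)), i < b.length →
    (List.range n).foldl (fun b j => b.set i ((b.getD i []).set j (f j))) b
      = b.set i ((List.range n).foldl (fun r j => r.set j (f j)) (b.getD i [])) := by
  intro n
  induction n with
  | zero =>
      intro b hb
      simp only [List.range_zero, List.foldl_nil]
      rw [List.getD_eq_getElem _ _ hb, List.set_getElem_self]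
  | succ n ih =>
      intro b hb
      rw [List.range_succ, List.foldl_append, List.foldl_append, ih b hb]
      have hget : ((b.set i ((List.range n).foldl (fun r j => r.set j (f j)) (b.getD i []))).getD i [])
          = (List.range n).foldl (fun r j => r.set j (f j)) (b.getD i []) := by
        rw [List.getD_eq_getElem _ _ (by simpa using hb)]
        simp
      simp only [List.foldl_cons, List.foldl_nil, hget, List.set_set]

theorem pvInnerA (goruntu : List (List Int)) (esik_degerleri : List Int) (i : Nat)
    (b : List (List Int)) (hb : i < b.length) (hlen : (b.getD i []).length = (goruntu.headD []).length) :
    (PySem.List.pyRange 0 ((goruntu.headD []).length : Int)).foldl (fun b j =>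
        let piksel := PySem.List.pyGetD (PySem.List.pyGetD goruntu (i : Int) []) j 0
        let val := pvScanA (PySem.Int.floordiv 255 (esik_degerleri.length : Int)) piksel
                     (PySem.List.enumerate esik_degerleri)
        b.set (i : Int).toNat ((b.getD (i : Int).toNat []).set j.toNat val)) b
      = b.set i (pvRowSpec esik_degerleri (goruntu.headD []).length (goruntu.getD i [])) := by
  rw [PySem.List.pyRange_zero_natCast, List.foldl_map]
  simp only [Int.toNat_natCast, PySem.List.pyGetD_natCast goruntu i]
  rw [pvMatFold _ i (goruntu.headD []).length b hb]
  rw [pvRowFold _ _ _ (le_of_eq hlen.symm)]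
  have hdrop : (b.getD i []).drop (goruntu.headD []).length = [] := by
    apply List.drop_eq_nil_of_le; omega
  rw [hdrop, List.append_nil]
  congr 1
  unfold pvRowSpec pvBand
  rw [PySem.List.pyRange_zero_natCast, List.map_map]
  simp only [Function.comp_def, pvScanA_eq_scanB]

theorem pvOuterFoldA (goruntu : List (List Int)) (esik_degerleri : List Int) :
    ∀ (n : Nat) (b : List (List Int)), n ≤ goruntu.length → b.length = goruntu.length →
    (∀ k, k < b.length → b.getD k [] = (List.range (goruntu.headD []).length).map (fun _ => (0 : Int))) →
    (List.range n).foldl (fun b (i : Nat) =>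
        (PySem.List.pyRange 0 (((goruntu.headD []).length : Nat) : Int)).foldl (fun b j =>
          let piksel := PySem.List.pyGetD (PySem.List.pyGetD goruntu (i : Int) []) j 0
          let val := pvScanA (PySem.Int.floordiv 255 (esik_degerleri.length : Int)) piksel
                       (PySem.List.enumerate esik_degerleri)
          b.set (i : Int).toNat ((b.getD (i : Int).toNat []).set j.toNat val)) b) b
      = (List.range n).map (fun i => pvRowSpec esik_degerleri (goruntu.headD []).length (goruntu.getD i []))
          ++ b.drop n := by
  intro n
  induction n with
  | zero => intro b _ _ _; simp
  | succ n ih =>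
      intro b hn hb hz
      rw [List.range_succ, List.foldl_append, ih b (by omega) hb hz]
      set A := (List.range n).map (fun i => pvRowSpec esik_degerleri (goruntu.headD []).length (goruntu.getD i [])) with hA
      have hlenA : A.length = n := by simp [hA]
      have hnb : n < b.length := by omega
      have hget : (A ++ b.drop n).getD n [] = b.getD n [] := by
        have h1 : n < (A ++ b.drop n).length := by
          rw [List.length_append, hlenA, List.length_drop]; omega
        rw [List.getD_eq_getElem _ _ h1, List.getD_eq_getElem _ _ hnb,
          List.getElem_append_right hlenA.le]
        simp [hlenA]
      simp only [List.foldl_cons, List.foldl_nil]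
      rw [pvInnerA goruntu esik_degerleri n _
        (by rw [List.length_append, hlenA, List.length_drop]; omega)
        (by rw [hget, hz n hnb]; simp)]
      rw [List.set_append]
      simp only [hlenA, lt_irrefl, if_false, Nat.sub_self]
      have hd : b.drop n = b[n] :: b.drop (n + 1) := List.drop_eq_getElem_cons hnb
      rw [hd, List.set_cons_zero]
      simp [hA]

theorem pvOuterA (goruntu : List (List Int)) (esik_degerleri : List Int) :
    cv2_benzeri_esikleme goruntu esik_degerleri
      = (esik_degerleri, goruntu.map (pvRowSpec esik_degerleri (goruntu.headD []).length)) := by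
  unfold cv2_benzeri_esikleme
  simp only []
  rw [PySem.List.pyRange_zero_natCast goruntu.length, List.foldl_map]
  rw [pvOuterFoldA goruntu esik_degerleri goruntu.length _ le_rfl (by simp)
    (by intro k hk; rw [List.getD_eq_getElem _ _ (by simpa using hk)]; simp)]
  have hdrop : ((List.range goruntu.length).map
      (fun _ => (List.range (goruntu.headD []).length).map (fun _ => (0 : Int)))).drop goruntu.length = [] := by
    apply List.drop_eq_nil_of_le; simp
  rw [hdrop, List.append_nil]
  congr 1
  apply List.ext_getElem (by simp)
  intro k h1 h2
  have hk : k < goruntu.length := by simpa using h2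
  simp [List.getElem?_eq_getElem hk]

-- ---- B side ----

theorem pvZipSelfMap {α β : Type} (h : α → β) :
    ∀ (l : List α), l.zip (l.map h) = l.map (fun x => (x, h x)) := by
  intro l
  induction l with
  | nil => rfl
  | cons x rest ih => simp [ih]

-- one masking pass distributes over the elementwise view of the matrix
theorem pvMaskFold (adim : Int) :
    ∀ (ps : List (Int × Int)) (gri : List (List Int)) (f : Int → Int),
    ps.foldl (fun b kt => (gri.zip b).map (fun gb =>
        (gb.1.zip gb.2).map (fun p => if p.1 ≤ kt.2 then kt.1 * adim else p.2)))
      (gri.map (fun r => r.map f))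
    = gri.map (fun r => r.map (fun v =>
        ps.foldl (fun acc kt => if v ≤ kt.2 then kt.1 * adim else acc) (f v))) := by
  intro ps
  induction ps with
  | nil => intro gri f; simp
  | cons kt rest ih =>
      intro gri f
      simp only [List.foldl_cons]
      have h1 : (gri.zip (gri.map (fun r => r.map f))).map (fun gb =>
          (gb.1.zip gb.2).map (fun p => if p.1 ≤ kt.2 then kt.1 * adim else p.2))
          = gri.map (fun r => r.map (fun v => if v ≤ kt.2 then kt.1 * adim else f v)) := by
        rw [pvZipSelfMap, List.map_map]
        apply List.map_congr_left
        intro r _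
        simp only [Function.comp_def]
        rw [pvZipSelfMap, List.map_map]
        simp [Function.comp_def]
      rw [h1, ih]

-- folding the masking passes in reversed order computes A's first-match scan
theorem pvRevScan (adim v : Int) :
    ∀ (l : List (Int × Int)),
    l.reverse.foldl (fun acc kt => if v ≤ kt.2 then kt.1 * adim else acc) 255
      = pvScanB adim v l := by
  intro l
  induction l with
  | nil => rfl
  | cons p rest ih =>
      cases p
      simp [List.foldl_append, ih, pvScanB]

theorem pvOuterB (goruntu : List (List Int)) (esik_degerleri : List Int) :
    cv2_benzeri_esikleme_alt goruntu esik_degerleri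
      = (esik_degerleri, goruntu.map (pvRowSpec esik_degerleri (goruntu.headD []).length)) := by
  unfold cv2_benzeri_esikleme_alt
  simp only []
  have hb0 : goruntu.map (fun _ => List.replicate (goruntu.headD []).length (255 : Int))
      = (goruntu.map (fun row => (PySem.List.pyRange 0 ((goruntu.headD []).length : Int)).map
          (fun j => PySem.List.pyGetD row j 0))).map (fun r => r.map (fun _ => (255 : Int))) := by
    rw [List.map_map]
    apply List.map_congr_left
    intro row _
    simp only [Function.comp_def, List.map_map]
    symm
    rw [List.eq_replicate_iff]
    constructor
    · simp [PySem.List.pyRange_zero_natCast]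
    · intro b hb
      simp at hb
      exact hb.2
  rw [hb0, pvMaskFold]
  congr 1
  rw [List.map_map]
  apply List.map_congr_left
  intro row _
  simp only [Function.comp_def, List.map_map]
  unfold pvRowSpec
  apply List.map_congr_left
  intro j _
  rw [pvRevScan]
  rfl

-- ===== VERDICT (by name: the statement is the Claim_ definition above) =====
theorem cv2_benzeri_esikleme_spec : Claim_equal_cv2_benzeri_esikleme := by
  intro goruntu esik_degerleri _ _
  unfold Spec_cv2_benzeri_esikleme
  rw [pvOuterA, pvOuterB]
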